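-- pv_equiv track=rewrite | github.com/Seburath/.codeforces | favorite_sequence.py | solve
-- ===== SOURCE A (Python) =====
-- from collections import deque
--
-- def solve(case):
--     sequence = deque(case.split())
--     solved = []
--     for i in range(len(sequence)):
--         if i % 2 == 0:
--             solved.append(sequence.popleft())
--         else:
--             solved.append(sequence.pop())
--
--     str_solved = ' '
--     return str_solved.join(solved)
-- ===== SOURCE B (Python) =====
-- def solve(case):
--     words = case.split()
--     k = (len(words) + 1) // 2
--     front = words[:k]
--     back = words[k:][::-1]
--     out = []
--     for f, b in zip(front, back):
--         out.append(f)
--         out.append(b)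
--     if len(front) > len(back):
--         out.append(front[-1])
--     return ' '.join(out)
-- ===== Notes on version B (the rewrite author's own statement) =====
-- stated objective: alternative
-- what changed: Replaces the deque with alternating popleft/pop inside an index loop by precomputing the front half and the reversed back half and merging them in one parallel zip pass (plus the leftover middle word when the count is odd).
import Mathlib
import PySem

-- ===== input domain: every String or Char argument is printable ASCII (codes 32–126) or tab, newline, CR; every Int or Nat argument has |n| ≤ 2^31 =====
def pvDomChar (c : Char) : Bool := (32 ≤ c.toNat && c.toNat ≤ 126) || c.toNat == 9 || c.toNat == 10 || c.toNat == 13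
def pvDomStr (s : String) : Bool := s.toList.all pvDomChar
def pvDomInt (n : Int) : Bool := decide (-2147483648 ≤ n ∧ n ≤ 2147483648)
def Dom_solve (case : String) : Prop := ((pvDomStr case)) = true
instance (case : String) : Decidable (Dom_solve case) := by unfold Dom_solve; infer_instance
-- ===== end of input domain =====

-- B replaces the deque with alternating popleft/pop by precomputing the front half
-- and the reversed back half and merging them in one parallel pass (objective: alternative).

-- ===== PORT A =====
-- the for-loop over range(len(sequence)): at each step pop from the left if i is even,
-- from the right if i is odd; the deque is the list `seq`.
def solveLoop (seq : List String) (i : Nat) : List String :=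
  if h : seq = [] then []
  else if i % 2 == 0 then seq.head h :: solveLoop seq.tail (i + 1)
  else seq.getLast h :: solveLoop seq.dropLast (i + 1)
termination_by seq.length
decreasing_by
  · cases seq with
    | nil => simp at h
    | cons x xs => simp
  · cases seq with
    | nil => simp at h
    | cons x xs => simp [List.length_dropLast]

def solve (case : String) : String :=
  PySem.Str.join " " (solveLoop (PySem.Str.split₀ case) 0)

-- ===== PORT B =====
-- merge front and the (already reversed) back half: the zip loop appending f then b,
-- plus the leftover last front element when front is longer.
def mergeHalves : List String → List String → List String
  | [], _ => []
  | fs, [] => fs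
  | f :: fs, b :: bs => f :: b :: mergeHalves fs bs

def solve_alt (case : String) : String :=
  let words := PySem.Str.split₀ case
  let k := (words.length + 1) / 2
  PySem.Str.join " " (mergeHalves (words.take k) ((words.drop k).reverse))

-- ===== PRECONDITION & SPEC =====
def Spec_solve (case : String) (out : String) : Prop := out = solve_alt case
instance (case : String) (out : String) : Decidable (Spec_solve case out) := by unfold Spec_solve; infer_instance

-- ===== CLAIM (what is proved, stated in full; the proofs are below) =====
def Claim_equal_solve : Prop := ∀ (case : String), Dom_solve case → Spec_solve case (solve case)

-- ===== LEMMAS AND PROOFS =====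

-- core: running the deque loop on front ++ back.reverse with an even index
-- interleaves front and back, provided back.length ≤ front.length ≤ back.length + 1
lemma solveLoop_merge : ∀ (back front : List String) (i : Nat), i % 2 = 0 →
    back.length ≤ front.length → front.length ≤ back.length + 1 →
    solveLoop (front ++ back.reverse) i = mergeHalves front back := by
  intro back
  induction back with
  | nil =>
    intro front i he h1 h2
    cases front with
    | nil => rw [solveLoop]; simp [mergeHalves]
    | cons f fs =>
      cases fs with
      | nil =>
        conv_lhs => rw [solveLoop]
        rw [dif_neg (by simp), if_pos (by simp [he])]
        conv_lhs => rw [solveLoop]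
        simp [mergeHalves]
      | cons g t => simp at h2
  | cons b bs ih =>
    intro back_front i he h1 h2
    cases back_front with
    | nil => simp at h1
    | cons f fs =>
      have hsh : (f :: fs) ++ (b :: bs).reverse = f :: ((fs ++ bs.reverse) ++ [b]) := by simp
      rw [hsh]
      conv_lhs => rw [solveLoop]
      rw [dif_neg (by simp), if_pos (by simp [he])]
      simp only [List.head_cons, List.tail_cons]
      conv_lhs => rw [solveLoop]
      have hne : (fs ++ bs.reverse) ++ [b] ≠ [] := by simp
      rw [dif_neg hne, if_neg (by simp; omega)]
      have hgl : ((fs ++ bs.reverse) ++ [b]).getLast hne = b := by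
        rw [List.getLast_append_singleton]
      rw [hgl, List.dropLast_concat]
      have hmh : mergeHalves (f :: fs) (b :: bs) = f :: b :: mergeHalves fs bs := rfl
      rw [hmh]
      have h1' : bs.length ≤ fs.length := by simp at h1; omega
      have h2' : fs.length ≤ bs.length + 1 := by simp at h2; omega
      rw [ih fs (i + 1 + 1) (by omega) h1' h2']

theorem solve_spec : Claim_equal_solve := by
  intro case _
  unfold Spec_solve solve solve_alt
  congr 1
  have key := solveLoop_merge
    ((PySem.Str.split₀ case).drop (((PySem.Str.split₀ case).length + 1) / 2)).reverse
    ((PySem.Str.split₀ case).take (((PySem.Str.split₀ case).length + 1) / 2))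
    0 rfl ?_ ?_
  · rw [List.reverse_reverse, List.take_append_drop] at key
    exact key
  · simp; omega
  · simp; omega
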